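-- pv_equiv track=rewrite | github.com/nguyenchiemminhvu/DSA | Problems/Leetcode/ConstructTheRectangle/solve.py | constructRectangle
-- ===== SOURCE A (Python) =====
-- from typing import List
-- import math
--
-- def constructRectangle(area: int) -> List[int]:
--     def get_divisors(val: int) -> List[int]:
--         div = []
--         sqrt = int(math.sqrt(val)) + 1
--         for i in range(1, sqrt):
--             if val % i == 0:
--                 div.append(i)
--                 if i * i != val:
--                     div.append(val // i)
--         return div
--
--     div = sorted(get_divisors(area))
--
--     diff = area
--     pair = []
--     for w in div:
--         l = area // w
--         if w > l:
--             break
--         if l - w < diff: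
--             pair = [l, w]
--     return pair
-- ===== SOURCE B (Python) =====
-- import math
--
-- def constructRectangle(area):
--     w = int(math.sqrt(area))
--     while w > 0 and area % w != 0:
--         w -= 1
--     return [area // w, w] if w > 0 else []
-- ===== Notes on version B (the rewrite author's own statement) =====
-- stated objective: simpler
-- what changed: Replaces A's collect-all-divisors + sort + ascending scan-with-break by a single descending scan from floor(sqrt(area)) down to the first divisor, keeping only the current candidate width.
import Mathlib
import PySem

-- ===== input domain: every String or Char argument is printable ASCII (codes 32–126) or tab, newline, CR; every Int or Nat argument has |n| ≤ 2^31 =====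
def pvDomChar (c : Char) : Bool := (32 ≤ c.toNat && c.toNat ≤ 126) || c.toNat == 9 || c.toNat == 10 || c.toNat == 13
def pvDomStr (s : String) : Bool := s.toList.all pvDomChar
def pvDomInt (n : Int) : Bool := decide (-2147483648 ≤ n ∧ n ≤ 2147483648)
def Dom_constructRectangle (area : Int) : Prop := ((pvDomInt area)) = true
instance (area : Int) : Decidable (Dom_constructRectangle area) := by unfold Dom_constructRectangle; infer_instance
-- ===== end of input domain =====

-- B replaces A's collect-all-divisors + sort + ascending scan by a single descending
-- scan from floor(sqrt(area)) to the first divisor (objective: simpler).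
-- Python's int(math.sqrt(x)) is exact (= isqrt) for 0 ≤ x ≤ 2^31, so it is ported as Nat.sqrt.

-- ===== PORT A =====
-- loop body of get_divisors: if val % i == 0: div.append(i); if i*i != val: div.append(val // i)
def divStep (val : Int) (div : List Int) (i : Int) : List Int :=
  if PySem.Int.mod val i = 0 then
    div ++ [i] ++ (if i * i ≠ val then [PySem.Int.floordiv val i] else [])
  else div

-- get_divisors(val)
def getDivisors (val : Int) : List Int :=
  (PySem.List.pyRange 1 (((Int.toNat val).sqrt : Int) + 1) 1).foldl (divStep val) []

-- the 'for w in div' loop with its break, carrying diff and pair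
def loopA (area diff : Int) (pair : List Int) : List Int → List Int
  | [] => pair
  | w :: rest =>
    let l := PySem.Int.floordiv area w
    if w > l then pair
    else loopA area diff (if l - w < diff then [l, w] else pair) rest

def constructRectangle (area : Int) : List Int :=
  loopA area area [] (PySem.List.sorted (getDivisors area) (fun x => x) false)

-- ===== PORT B =====
-- the while loop: decrement w while w > 0 and area % w != 0
def findW (area : Int) : Nat → Nat
  | 0 => 0
  | n + 1 => if PySem.Int.mod area ((n : Int) + 1) ≠ 0 then findW area n else n + 1

def constructRectangle_alt (area : Int) : List Int :=
  let w := findW area (Int.toNat area).sqrt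
  if 0 < w then [PySem.Int.floordiv area (w : Int), (w : Int)] else []

-- ===== PRECONDITION & SPEC =====
-- math.sqrt raises ValueError on negative area (in A and in B alike); nothing else raises.
def Pre_constructRectangle (area : Int) : Prop := 0 ≤ area
instance (area : Int) : Decidable (Pre_constructRectangle area) := by unfold Pre_constructRectangle; infer_instance
def pvWitness_constructRectangle : Int := (12)

def Spec_constructRectangle (area : Int) (out : List Int) : Prop := out = constructRectangle_alt area
instance (area : Int) (out : List Int) : Decidable (Spec_constructRectangle area out) := by unfold Spec_constructRectangle; infer_instance

-- ===== CLAIM (what is proved, stated in full; the proofs are below) =====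
def Claim_equal_constructRectangle : Prop := ∀ (area : Int), Dom_constructRectangle area → Pre_constructRectangle area → Spec_constructRectangle area (constructRectangle area)

-- ===== LEMMAS AND PROOFS =====

-- findW a k is ≤ k; it is 0 or a "divisor" (mod = 0); and no d with findW a k < d ≤ k has mod a d = 0
theorem findW_spec (a : Int) : ∀ k : Nat,
    findW a k ≤ k ∧
    (findW a k = 0 ∨ (1 ≤ findW a k ∧ PySem.Int.mod a (findW a k : Int) = 0)) ∧
    (∀ d : Nat, findW a k < d → d ≤ k → PySem.Int.mod a (d : Int) ≠ 0) := by
  intro k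
  induction k with
  | zero => exact ⟨le_refl _, Or.inl rfl, fun d h1 h2 => absurd (Nat.lt_of_lt_of_le h1 h2) (lt_irrefl 0)⟩
  | succ n ih =>
    obtain ⟨hle, hdiv, hmax⟩ := ih
    by_cases h : PySem.Int.mod a ((n : Int) + 1) ≠ 0
    · have he : findW a (n + 1) = findW a n := by simp only [findW]; rw [if_pos h]
      refine ⟨by omega, by rw [he]; exact hdiv, ?_⟩
      intro d h1 h2
      rw [he] at h1
      rcases Nat.lt_or_ge d (n + 1) with hd | hd
      · exact hmax d h1 (by omega)
      · have : d = n + 1 := by omega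
        subst this
        simpa using h
    · have he : findW a (n + 1) = n + 1 := by simp only [findW]; rw [if_neg h]
      rw [he]
      push_neg at h
      refine ⟨le_refl _, Or.inr ⟨by omega, by push_cast; exact h⟩, ?_⟩
      intro d h1 h2
      omega

-- the divisor-collecting fold only ever appends
theorem mem_foldl_divStep_of_mem_init (val : Int) :
    ∀ (l init : List Int) (x : Int), x ∈ init → x ∈ l.foldl (divStep val) init := by
  intro l
  induction l with
  | nil => intro init x hx; simpa using hx
  | cons i rest ih =>
    intro init x hx
    simp only [List.foldl_cons]
    apply ih
    unfold divStep
    split_ifs <;> simp [hx]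

-- any i in the scanned range with mod val i = 0 ends up in the fold's result
theorem mem_foldl_divStep_self (val : Int) :
    ∀ (l init : List Int) (i : Int), i ∈ l → PySem.Int.mod val i = 0 →
      i ∈ l.foldl (divStep val) init := by
  intro l
  induction l with
  | nil => intro init i hi; simp at hi
  | cons j rest ih =>
    intro init i hi hmod
    simp only [List.foldl_cons]
    rcases List.mem_cons.mp hi with h | h
    · subst h
      apply mem_foldl_divStep_of_mem_init
      unfold divStep
      rw [if_pos hmod]
      simp
    · exact ih _ i h hmod

-- every element produced by the fold is a positive divisor of val
theorem foldl_divStep_forward (val : Int) (hval : 1 ≤ val) :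
    ∀ (l init : List Int),
      (∀ i ∈ l, 0 < i) → (∀ x ∈ init, 0 < x ∧ val % x = 0) →
      ∀ x ∈ l.foldl (divStep val) init, 0 < x ∧ val % x = 0 := by
  intro l
  induction l with
  | nil => intro init _ hinit x hx; exact hinit x (by simpa using hx)
  | cons i rest ih =>
    intro init hl hinit x hx
    simp only [List.foldl_cons] at hx
    refine ih _ (fun j hj => hl j (List.mem_cons_of_mem _ hj)) ?_ x hx
    intro y hy
    have hipos : 0 < i := hl i (List.mem_cons_self ..)
    unfold divStep at hy
    split_ifs at hy with hmod hne
    · rw [PySem.Int.mod_eq_emod_of_pos hipos] at hmod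
      have hdvd : i ∣ val := Int.dvd_of_emod_eq_zero hmod
      obtain ⟨c, hc⟩ := hdvd
      have hine : i ≠ 0 := by omega
      have hq : PySem.Int.floordiv val i = c := by
        rw [PySem.Int.floordiv_eq_ediv_of_pos hipos, hc, Int.mul_ediv_cancel_left _ hine]
      simp only [List.append_assoc, List.mem_append, List.mem_singleton] at hy
      rcases hy with hy | hy | hy
      · exact hinit y hy
      · subst hy; exact ⟨hipos, hmod⟩
      · rw [hq] at hy
        subst hy
        have hcpos : 0 < y := by nlinarith
        exact ⟨hcpos, Int.emod_eq_zero_of_dvd ⟨i, by rw [hc, mul_comm]⟩⟩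
    · rw [PySem.Int.mod_eq_emod_of_pos hipos] at hmod
      simp only [List.append_assoc, List.mem_append, List.mem_singleton] at hy
      rcases hy with hy | hy | hy
      · exact hinit y hy
      · subst hy; exact ⟨hipos, hmod⟩
      · simp at hy
    · exact hinit y hy

theorem pairwise_le_getLast (L : List Int) (h : L.Pairwise (· ≤ ·)) :
    ∀ m, L.getLast? = some m → ∀ x ∈ L, x ≤ m := by
  induction L with
  | nil => intro m hm; simp at hm
  | cons y t ih =>
    intro m hm x hx
    cases t with
    | nil =>
      simp at hm hx
      omega
    | cons z t' =>
      rw [List.getLast?_cons_cons] at hm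
      rcases List.pairwise_cons.mp h with ⟨hy, ht⟩
      rcases List.mem_cons.mp hx with hx | hx
      · subst hx
        have hz : x ≤ z := hy z (List.mem_cons_self ..)
        have := ih ht m hm z (List.mem_cons_self ..)
        omega
      · exact ih ht m hm x hx

-- the break-carrying loop on a sorted list of positive numbers returns the last
-- element w with w*w ≤ area (paired as [area/w, w]), or pair if there is none
theorem loopA_sorted (a : Int) (ha : 1 ≤ a) :
    ∀ (L : List Int) (pair : List Int),
      (∀ x ∈ L, 0 < x) → L.Pairwise (· ≤ ·) →
      loopA a a pair L =
        match (L.filter (fun x => decide (x * x ≤ a))).getLast? with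
        | none => pair
        | some m => [a / m, m] := by
  intro L
  induction L with
  | nil => intro pair _ _; simp [loopA]
  | cons w rest ih =>
    intro pair hpos hpw
    have hw : 0 < w := hpos w (List.mem_cons_self ..)
    rcases List.pairwise_cons.mp hpw with ⟨hwle, hpw'⟩
    have hfd : PySem.Int.floordiv a w = a / w := PySem.Int.floordiv_eq_ediv_of_pos hw
    by_cases hbig : w > a / w
    · -- break: w*w > a, and every later element is ≥ w, so the filter is empty
      have hwsq : ¬ (w * w ≤ a) := by
        intro hle
        exact absurd ((Int.le_ediv_iff_mul_le hw).mpr hle) (not_le.mpr hbig)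
      have hfilter : (w :: rest).filter (fun x => decide (x * x ≤ a)) = [] := by
        rw [List.filter_cons_of_neg (by simpa using hwsq)]
        rw [List.filter_eq_nil_iff]
        intro y hy
        have hwy : w ≤ y := hwle y hy
        have : w * w ≤ y * y := mul_le_mul hwy hwy hw.le (by omega)
        simp only [decide_eq_true_eq]
        omega
      simp only [loopA, hfd]
      rw [if_pos hbig, hfilter]
      simp
    · -- continue: pair is overwritten with [l, w]
      push_neg at hbig
      have hwsq : w * w ≤ a := (Int.le_ediv_iff_mul_le hw).mp hbig
      have hl_le : a / w ≤ a := Int.ediv_le_self _ (by omega)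
      have hcond : a / w - w < a := by omega
      have hstep : loopA a a pair (w :: rest) = loopA a a [a / w, w] rest := by
        simp only [loopA, hfd]
        rw [if_neg (not_lt.mpr hbig), if_pos hcond]
      rw [hstep, ih [a / w, w] (fun x hx => hpos x (List.mem_cons_of_mem _ hx)) hpw']
      rw [List.filter_cons_of_pos (by simpa using hwsq)]
      cases hft : rest.filter (fun x => decide (x * x ≤ a)) with
      | nil => simp
      | cons z t =>
        rw [List.getLast?_cons_cons]
        cases hg : (z :: t).getLast? with
        | none => simp [List.getLast?_eq_none_iff] at hg
        | some m => rfl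

-- a divisor d with 1 ≤ d ≤ sqrt(area) is in get_divisors(area)
theorem mem_getDivisors_small (a : Int) (d : Int)
    (h1 : 1 ≤ d) (h2 : d ≤ ((Int.toNat a).sqrt : Int)) (hmod : PySem.Int.mod a d = 0) :
    d ∈ getDivisors a := by
  unfold getDivisors
  apply mem_foldl_divStep_self _ _ _ _ _ hmod
  rw [PySem.List.mem_pyRange_one]
  omega

-- the main glue for 1 ≤ a: both programs compute the largest divisor w with w*w ≤ a
theorem main_pos (a : Int) (ha : 1 ≤ a) : constructRectangle a = constructRectangle_alt a := by
  -- the sorted divisor list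
  have hfwd : ∀ x ∈ getDivisors a, 0 < x ∧ a % x = 0 := by
    intro x hx
    unfold getDivisors at hx
    refine foldl_divStep_forward a ha _ [] ?_ (by simp) x hx
    intro i hi
    rw [PySem.List.mem_pyRange_one] at hi
    omega
  have hmemL : ∀ x, x ∈ PySem.List.sorted (getDivisors a) (fun x => x) false ↔ x ∈ getDivisors a := by
    intro x; exact PySem.List.mem_sorted _ _ _ _
  have hpwL : (PySem.List.sorted (getDivisors a) (fun x => x) false).Pairwise (· ≤ ·) := by
    simpa using PySem.List.sorted_pairwise (getDivisors a) (fun x => x)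
  have hA : constructRectangle a =
      match ((PySem.List.sorted (getDivisors a) (fun x => x) false).filter
          (fun x => decide (x * x ≤ a))).getLast? with
      | none => []
      | some m => [a / m, m] := by
    unfold constructRectangle
    exact loopA_sorted a ha _ [] (fun x hx => (hfwd x ((hmemL x).mp hx)).1) hpwL
  -- square-root facts
  have hs1 : 1 ≤ (Int.toNat a).sqrt := Nat.sqrt_pos.mpr (by omega)
  have hsq_iff : ∀ x : Int, 0 < x → (x * x ≤ a ↔ x ≤ ((Int.toNat a).sqrt : Int)) := by
    intro x hx
    have hxn : (x.toNat : Int) = x := Int.toNat_of_nonneg hx.le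
    have han : ((Int.toNat a : Nat) : Int) = a := Int.toNat_of_nonneg (by omega)
    constructor
    · intro h
      have h2 : (↑(x.toNat * x.toNat) : Int) ≤ ↑(Int.toNat a) := by push_cast; rw [hxn, han]; exact h
      have h3 : x.toNat ≤ (Int.toNat a).sqrt := Nat.le_sqrt.mpr (by exact_mod_cast h2)
      omega
    · intro h
      have h3 : x.toNat ≤ (Int.toNat a).sqrt := by omega
      have h4 := Nat.le_sqrt.mp h3
      have h5 : (↑(x.toNat * x.toNat) : Int) ≤ ↑(Int.toNat a) := by exact_mod_cast h4
      push_cast [hxn, han] at h5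
      exact h5
  -- B's result
  obtain ⟨hwle, hwdiv, hwmax⟩ := findW_spec a (Int.toNat a).sqrt
  have hmod1 : PySem.Int.mod a 1 = 0 := by rw [PySem.Int.mod_eq_emod_of_pos one_pos]; simp
  have hw0pos : 1 ≤ findW a (Int.toNat a).sqrt := by
    rcases hwdiv with h | h
    · exfalso; refine hwmax 1 (by omega) hs1 ?_; simpa using hmod1
    · exact h.1
  have hw0mod : PySem.Int.mod a ((findW a (Int.toNat a).sqrt : Nat) : Int) = 0 := by
    rcases hwdiv with h | h
    · omega
    · exact h.2
  have hw0cast : (0 : Int) < ((findW a (Int.toNat a).sqrt : Nat) : Int) := by exact_mod_cast hw0pos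
  -- w0 is in the filtered sorted list
  have hw0mem : ((findW a (Int.toNat a).sqrt : Nat) : Int) ∈ getDivisors a :=
    mem_getDivisors_small a _ (by exact_mod_cast hw0pos) (by exact_mod_cast hwle) hw0mod
  have hw0F : ((findW a (Int.toNat a).sqrt : Nat) : Int) ∈
      (PySem.List.sorted (getDivisors a) (fun x => x) false).filter (fun x => decide (x * x ≤ a)) := by
    refine List.mem_filter.mpr ⟨(hmemL _).mpr hw0mem, ?_⟩
    simp only [decide_eq_true_eq]
    exact (hsq_iff _ hw0cast).mpr (by exact_mod_cast hwle)
  have hFne : (PySem.List.sorted (getDivisors a) (fun x => x) false).filter (fun x => decide (x * x ≤ a)) ≠ [] :=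
    List.ne_nil_of_mem hw0F
  obtain ⟨m, hm⟩ : ∃ m, ((PySem.List.sorted (getDivisors a) (fun x => x) false).filter
      (fun x => decide (x * x ≤ a))).getLast? = some m := by
    cases hF : ((PySem.List.sorted (getDivisors a) (fun x => x) false).filter
        (fun x => decide (x * x ≤ a))).getLast? with
    | none => exact absurd (List.getLast?_eq_none_iff.mp hF) hFne
    | some m => exact ⟨m, rfl⟩
  have hmF : m ∈ (PySem.List.sorted (getDivisors a) (fun x => x) false).filter (fun x => decide (x * x ≤ a)) :=
    List.mem_of_getLast? hm
  have hmdiv := hfwd m ((hmemL m).mp (List.mem_filter.mp hmF).1)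
  have hmsq : m * m ≤ a := by
    have := (List.mem_filter.mp hmF).2
    simpa using this
  have hmle_s : m ≤ ((Int.toNat a).sqrt : Int) := (hsq_iff m hmdiv.1).mp hmsq
  -- m ≤ w0 (maximality of findW) and w0 ≤ m (m is last of a ≤-sorted list)
  have h1 : m.toNat ≤ findW a (Int.toNat a).sqrt := by
    by_contra hcon
    refine hwmax m.toNat (by omega) (by omega) ?_ 
    rw [PySem.Int.mod_eq_emod_of_pos (by omega), Int.toNat_of_nonneg hmdiv.1.le]
    exact hmdiv.2
  have h2 : ((findW a (Int.toNat a).sqrt : Nat) : Int) ≤ m :=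
    pairwise_le_getLast _ (hpwL.filter _) m hm _ hw0F
  have hmw : m = ((findW a (Int.toNat a).sqrt : Nat) : Int) := by omega
  -- conclude
  rw [hA, hm, hmw]
  unfold constructRectangle_alt
  rw [if_pos (by omega : 0 < findW a (Int.toNat a).sqrt)]
  rw [PySem.Int.floordiv_eq_ediv_of_pos hw0cast]

-- ===== VERDICT (by name: the statement is the Claim_ definition above) =====
theorem constructRectangle_spec : Claim_equal_constructRectangle := by
  intro a _hdom hpre
  unfold Spec_constructRectangle
  rcases eq_or_lt_of_le hpre with h0 | hpos
  · rw [← h0]; decide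
  · exact main_pos a hpos
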